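-- pv_equiv track=rewrite | github.com/Arsen1302/Code-copy-detector | TestData/solutions/problem_1084_4.py | solution_1084_4
-- ===== SOURCE A (Python) =====
-- from typing import List
--
-- def solution_1084_4(rowSum: List[int], colSum: List[int]) -> List[List[int]]:
--     """
--     We can firstly push the number in smallest rowSum and colSum, and push the remain number.
--     Time comlexity: O(n)(sort use O(nlogn)), space comlexity: O(1)(if ignore the space of answer and sort the rowSum and colSum in-place)
--     """
--     # Generate a matrix contain 0
--     ans=[[0]*len(colSum) for _ in range(len(rowSum))]
--
--     # Enumarate rowNum and colNum and sort them by value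
--     row,col=[[i,rowSum[i]]for i in range(len(rowSum))],[[i,colSum[i]]for i in range(len(colSum))]
--     row.sort(key=lambda x:x[1])
--     col.sort(key=lambda x:x[1])
--
--     # From smallest rowSum and colSum, push the min(rowSum,colSum) into the position of them, keep it from exceeding the both sum.
--     # Pop the smaller one, because it has been total used, and the other one minus the amount.
--     while row and col:
--         if row[0][1]<=col[0][1]:
--             ans[row[0][0]][col[0][0]]=row[0][1]
--             col[0][1]-=row[0][1]
--             row.pop(0)
--         else:
--             ans[row[0][0]][col[0][0]]=col[0][1]
--             row[0][1]-=col[0][1]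
--             col.pop(0)
--     return ans
-- ===== SOURCE B (Python) =====
-- from typing import List
--
-- def solution_1084_4(rowSum: List[int], colSum: List[int]) -> List[List[int]]:
--     # Prefix-sum merge: sort (index, value) pairs as in the greedy, but instead of
--     # mutating heads and popping, precompute cumulative prefix sums of each sorted
--     # side and walk them with two pointers; each cell gets the merged-prefix delta.
--     ans = [[0] * len(colSum) for _ in range(len(rowSum))]
--     rows = sorted(enumerate(rowSum), key=lambda p: p[1])
--     cols = sorted(enumerate(colSum), key=lambda p: p[1])
--     rpref, t = [], 0
--     for i, v in rows:
--         t += v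
--         rpref.append((i, t))
--     cpref, t = [], 0
--     for j, v in cols:
--         t += v
--         cpref.append((j, t))
--     t = 0
--     i = j = 0
--     while i < len(rpref) and j < len(cpref):
--         ri, R = rpref[i]
--         cj, C = cpref[j]
--         m = R if R <= C else C
--         ans[ri][cj] = m - t
--         t = m
--         if R <= C:
--             i += 1
--         else:
--             j += 1
--     return ans
-- ===== Notes on version B (the rewrite author's own statement) =====
-- stated objective: alternative
-- what changed: Replaces the mutate-head-and-pop(0) greedy loop with precomputed prefix sums of the two sorted sides merged by two index pointers: each cell's value is the delta between consecutive merged prefix sums, no list is mutated or popped.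
import Mathlib
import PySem

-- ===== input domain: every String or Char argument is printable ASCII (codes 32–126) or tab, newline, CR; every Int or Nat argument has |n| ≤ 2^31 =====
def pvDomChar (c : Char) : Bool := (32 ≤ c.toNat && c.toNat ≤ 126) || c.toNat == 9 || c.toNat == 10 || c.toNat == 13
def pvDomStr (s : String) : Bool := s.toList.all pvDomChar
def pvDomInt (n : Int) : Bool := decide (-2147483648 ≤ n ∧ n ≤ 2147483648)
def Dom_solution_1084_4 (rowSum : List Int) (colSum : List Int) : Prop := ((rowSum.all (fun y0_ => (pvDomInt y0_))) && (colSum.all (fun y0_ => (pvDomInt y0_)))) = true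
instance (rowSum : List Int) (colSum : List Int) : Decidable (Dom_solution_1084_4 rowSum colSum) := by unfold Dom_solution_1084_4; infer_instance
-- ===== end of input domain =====

-- B replaces the mutate-and-pop greedy with a prefix-sum merge over the same sorted index lists (alternative decomposition, same results; A mutates its local lists only, not its arguments).
-- ===== PORT A =====
-- A mutates `ans` in place in Python; the equivalence proved here is about the return value.
-- shared index-assignment helper: ans[r][c] = v (indices are always in range when used)
def setMat (ans : List (List Int)) (r c : Int) (v : Int) : List (List Int) :=
  ans.set r.toNat ((ans.getD r.toNat []).set c.toNat v)

-- the while loop of A: heads carry the remaining (mutated) values, the used-up side is popped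
def aLoop (row col : List (Int × Int)) (ans : List (List Int)) : List (List Int) :=
  match row, col with
  | [], _ => ans
  | _, [] => ans
  | (ri, rv) :: rs, (ci, cv) :: cs =>
      if rv ≤ cv then
        aLoop rs ((ci, cv - rv) :: cs) (setMat ans ri ci rv)
      else
        aLoop ((ri, rv - cv) :: rs) cs (setMat ans ri ci cv)
termination_by row.length + col.length

def solution_1084_4 (rowSum : List Int) (colSum : List Int) : List (List Int) :=
  let ans := List.replicate rowSum.length (List.replicate colSum.length (0 : Int))
  let row := PySem.List.sorted (PySem.List.enumerate rowSum 0) (fun p => p.2) false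
  let col := PySem.List.sorted (PySem.List.enumerate colSum 0) (fun p => p.2) false
  aLoop row col ans

-- ===== PORT B =====
-- the prefix-building for loop of Source B (append to rpref while accumulating t)
def bPref (ps : List (Int × Int)) : List (Int × Int) :=
  (ps.foldl (fun (st : List (Int × Int) × Int) p =>
    (st.1 ++ [(p.1, st.2 + p.2)], st.2 + p.2)) ([], 0)).1

-- the two-pointer merge of Source B, recursing on the unconsumed suffixes
def bMerge (rpref cpref : List (Int × Int)) (t : Int) (ans : List (List Int)) : List (List Int) :=
  match rpref, cpref with
  | [], _ => ans
  | _, [] => ans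
  | (ri, R) :: rs, (cj, C) :: cs =>
      let m := if R ≤ C then R else C
      let ans' := setMat ans ri cj (m - t)
      if R ≤ C then bMerge rs ((cj, C) :: cs) m ans'
      else bMerge ((ri, R) :: rs) cs m ans'
termination_by rpref.length + cpref.length

def solution_1084_4_alt (rowSum : List Int) (colSum : List Int) : List (List Int) :=
  let ans := List.replicate rowSum.length (List.replicate colSum.length (0 : Int))
  let rows := PySem.List.sorted (PySem.List.enumerate rowSum 0) (fun p => p.2) false
  let cols := PySem.List.sorted (PySem.List.enumerate colSum 0) (fun p => p.2) false
  bMerge (bPref rows) (bPref cols) 0 ans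

-- ===== PRECONDITION & SPEC =====
def Spec_solution_1084_4 (rowSum : List Int) (colSum : List Int) (out : List (List Int)) : Prop := out = solution_1084_4_alt rowSum colSum
instance (rowSum : List Int) (colSum : List Int) (out : List (List Int)) : Decidable (Spec_solution_1084_4 rowSum colSum out) := by unfold Spec_solution_1084_4; infer_instance

-- ===== CLAIM (what is proved, stated in full; the proofs are below) =====
def Claim_equal_solution_1084_4 : Prop := ∀ (rowSum : List Int) (colSum : List Int), Dom_solution_1084_4 rowSum colSum → Spec_solution_1084_4 rowSum colSum (solution_1084_4 rowSum colSum)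

-- ===== LEMMAS AND PROOFS =====

-- recover the sorted value list from a prefix-sum list, relative to base t
def diffs (ps : List (Int × Int)) (t : Int) : List (Int × Int) :=
  match ps with
  | [] => []
  | (i, R) :: rs => (i, R - t) :: diffs rs R

-- recursive characterisation of bPref
def prefRec (t : Int) (ps : List (Int × Int)) : List (Int × Int) :=
  match ps with
  | [] => []
  | (i, v) :: rs => (i, t + v) :: prefRec (t + v) rs

theorem foldl_pref (ps : List (Int × Int)) (acc : List (Int × Int)) (t : Int) :
    (ps.foldl (fun (st : List (Int × Int) × Int) p =>
      (st.1 ++ [(p.1, st.2 + p.2)], st.2 + p.2)) (acc, t)).1 = acc ++ prefRec t ps := by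
  induction ps generalizing acc t with
  | nil => simp [prefRec]
  | cons p rs ih => simp [List.foldl, prefRec, ih]

theorem bPref_eq (ps : List (Int × Int)) : bPref ps = prefRec 0 ps := by
  simpa using foldl_pref ps [] 0

theorem diffs_prefRec (ps : List (Int × Int)) (t : Int) : diffs (prefRec t ps) t = ps := by
  induction ps generalizing t with
  | nil => rfl
  | cons p rs ih =>
      obtain ⟨i, v⟩ := p
      simp [prefRec, diffs, ih]

theorem aLoop_eq_bMerge (rp cp : List (Int × Int)) (t : Int) (ans : List (List Int)) :
    aLoop (diffs rp t) (diffs cp t) ans = bMerge rp cp t ans := by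
  induction rp generalizing cp t ans with
  | nil => cases cp <;> simp [diffs, aLoop, bMerge]
  | cons r rs ih =>
      induction cp generalizing t ans with
      | nil => obtain ⟨ri, R⟩ := r; simp [diffs, aLoop, bMerge]
      | cons c cs ihc =>
          obtain ⟨ri, R⟩ := r
          obtain ⟨cj, C⟩ := c
          by_cases h : R ≤ C
          · have h' : R - t ≤ C - t := by omega
            rw [diffs, diffs, aLoop, bMerge]
            simp only [h, h', if_true]
            have : (cj, C - t - (R - t)) :: diffs cs C = diffs ((cj, C) :: cs) R := by
              simp [diffs]
            rw [this, ih]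
          · have h' : ¬ (R - t ≤ C - t) := by omega
            rw [diffs, diffs, aLoop, bMerge]
            simp only [h, h', if_false]
            have : (ri, R - t - (C - t)) :: diffs rs R = diffs ((ri, R) :: rs) C := by
              simp [diffs]
            rw [this, ihc]

-- ===== VERDICT (by name: the statement is the Claim_ definition above) =====
theorem solution_1084_4_spec : Claim_equal_solution_1084_4 := by
  intro rowSum colSum _
  simp only [Spec_solution_1084_4, solution_1084_4, solution_1084_4_alt]
  rw [bPref_eq, bPref_eq, ← aLoop_eq_bMerge, diffs_prefRec, diffs_prefRec]
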